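-- pv_equiv track=rewrite | github.com/HamadAbdulRazzaq/PalindromicTreeVisualizer | Display.py | set_col_width
-- ===== SOURCE A (Python) =====
-- def set_col_width(pdg:dict, size):
--     col = {}
--     try:
--         d = max(list(pdg.values()))
--     except:
--         d = 0
--     for i in range(d+1):
--         temp = []
--         for j in pdg:
--             if pdg[j] == i:
--                 if j == None:
--                     temp.append(2)
--                 elif j == "":
--                     temp.append(1)
--                 else:
--                     temp.append(len(j))
--         try:
--             col[i] = (((max(temp)//2)+1)*size)
--         except:
--             col[i] = 100
--     return col
-- ===== SOURCE B (Python) =====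
-- def set_col_width(pdg: dict, size):
--     widest = {}   # depth -> widest label at that depth
--     maxv = None
--     for j, v in pdg.items():
--         w = 2 if j is None else (len(j) or 1)
--         if maxv is None or v > maxv:
--             maxv = v
--         if w > widest.get(v, 0):
--             widest[v] = w
--     d = 0 if maxv is None else maxv
--     return {i: ((widest[i] // 2) + 1) * size if i in widest else 100
--             for i in range(d + 1)}
-- ===== Notes on version B (the rewrite author's own statement) =====
-- stated objective: faster
-- what changed: Replaces the per-depth rescans of the whole dict (one filtering pass for each depth 0..d) by a single pass that records the running max depth and, in a bucket dict, the widest label per depth, then emits the answer with one lookup per depth.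
import Mathlib
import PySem

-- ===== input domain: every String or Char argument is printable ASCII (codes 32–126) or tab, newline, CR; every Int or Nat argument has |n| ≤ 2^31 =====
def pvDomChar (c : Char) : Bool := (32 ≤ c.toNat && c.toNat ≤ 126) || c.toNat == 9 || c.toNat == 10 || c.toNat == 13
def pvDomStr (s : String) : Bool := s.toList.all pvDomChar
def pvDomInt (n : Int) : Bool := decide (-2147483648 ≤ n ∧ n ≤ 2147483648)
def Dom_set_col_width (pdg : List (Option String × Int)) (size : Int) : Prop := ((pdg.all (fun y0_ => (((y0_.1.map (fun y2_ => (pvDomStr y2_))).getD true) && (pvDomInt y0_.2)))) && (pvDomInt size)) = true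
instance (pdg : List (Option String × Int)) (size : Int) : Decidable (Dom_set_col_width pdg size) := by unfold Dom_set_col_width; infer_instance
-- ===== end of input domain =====

-- B replaces A's per-depth rescans of the dict by one grouping pass (max depth + widest label per depth); objective: faster.

-- ===== PORT A =====
-- width of a key as A computes it inside its inner loop
def pvWidthA (j : Option String) : Int :=
  match j with
  | none => 2
  | some s => if s == "" then 1 else PySem.Str.len s

def set_col_width (pdg : List (Option String × Int)) (size : Int) : List (Int × Int) :=
  let d : Int := match PySem.List.max? (pdg.map (·.2)) (fun x => x) with
    | some m => m
    | none => 0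
  ((PySem.List.pyRange 0 (d+1) 1).foldl (fun (col : PySem.Dict Int Int) i =>
      let temp : List Int := pdg.foldl (fun temp jv =>
        if jv.2 == i then temp ++ [pvWidthA jv.1] else temp) []
      col.insert i (match PySem.List.max? temp (fun x => x) with
        | some m => (PySem.Int.floordiv m 2 + 1) * size
        | none => 100)) PySem.Dict.empty).items

-- ===== PORT B =====
-- width of a key as B computes it ('len(j) or 1')
def pvWidthB (j : Option String) : Int :=
  match j with
  | none => 2
  | some s => if PySem.Str.len s == 0 then 1 else PySem.Str.len s

-- one grouping pass: running max depth and widest label per depth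
def pvStepB (st : PySem.Dict Int Int × Option Int) (jv : Option String × Int) :
    PySem.Dict Int Int × Option Int :=
  let w : Int := pvWidthB jv.1
  let maxv : Option Int := match st.2 with
    | none => some jv.2
    | some m => some (if jv.2 > m then jv.2 else m)
  let widest := if st.1.getD jv.2 0 < w then st.1.insert jv.2 w else st.1
  (widest, maxv)

def set_col_width_alt (pdg : List (Option String × Int)) (size : Int) : List (Int × Int) :=
  let st := pdg.foldl pvStepB (PySem.Dict.empty, none)
  let d : Int := st.2.getD 0
  (PySem.List.pyRange 0 (d+1) 1).map (fun i =>
    (i, match st.1.get? i with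
        | some m => (PySem.Int.floordiv m 2 + 1) * size
        | none => 100))

-- ===== PRECONDITION & SPEC =====
def Spec_set_col_width (pdg : List (Option String × Int)) (size : Int) (out : List (Int × Int)) : Prop := out = set_col_width_alt pdg size
instance (pdg : List (Option String × Int)) (size : Int) (out : List (Int × Int)) : Decidable (Spec_set_col_width pdg size out) := by unfold Spec_set_col_width; infer_instance

-- ===== CLAIM (what is proved, stated in full; the proofs are below) =====
def Claim_equal_set_col_width : Prop := ∀ (pdg : List (Option String × Int)) (size : Int), Dom_set_col_width pdg size → Spec_set_col_width pdg size (set_col_width pdg size)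

-- ===== LEMMAS AND PROOFS =====

theorem widthB_eq_widthA (j : Option String) : pvWidthB j = pvWidthA j := by
  cases j with
  | none => rfl
  | some s =>
      simp only [pvWidthB, pvWidthA]
      by_cases h : s = ""
      · simp [h]
      · simp [h]

theorem widthA_pos (j : Option String) : 1 ≤ pvWidthA j := by
  cases j with
  | none => simp [pvWidthA]
  | some s =>
      simp only [pvWidthA]
      by_cases h : s = ""
      · simp [h]
      · have hne : s.toList ≠ [] := fun hn => h (String.toList_inj.mp (by simp [hn]))
        have hp := List.length_pos_iff.mpr hne
        have hl : PySem.Str.len s = (s.toList.length : Int) := PySem.Str.len_eq s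
        rw [if_neg (by simp [h]), hl]
        omega

-- B's running max component
theorem sndB_fold (l : List (Option String × Int)) (D : PySem.Dict Int Int) (m : Int) :
    (l.foldl pvStepB (D, some m)).2 = some ((l.map (·.2)).foldl max m) := by
  induction l generalizing D m with
  | nil => rfl
  | cons x t ih =>
      simp only [List.foldl_cons, List.map_cons, pvStepB]
      rw [ih]
      congr 2
      rw [max_def]
      split_ifs <;> omega

theorem sndB_eq_max? (l : List (Option String × Int)) :
    (l.foldl pvStepB (PySem.Dict.empty, none)).2 = PySem.List.max? (l.map (·.2)) (fun x => x) := by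
  cases l with
  | nil => rfl
  | cons x t =>
      simp only [List.foldl_cons, List.map_cons, pvStepB]
      rw [sndB_fold, PySem.List.max?_id_cons]

-- B's bucket dict: getD is the running max of widths at that depth
theorem fstB_getD (l : List (Option String × Int)) (st : PySem.Dict Int Int × Option Int) (i : Int) :
    (l.foldl pvStepB st).1.getD i 0 =
      ((l.filter (fun jv => jv.2 == i)).map (fun jv => pvWidthA jv.1)).foldl max (st.1.getD i 0) := by
  induction l generalizing st with
  | nil => rfl
  | cons x t ih =>
      simp only [List.foldl_cons, List.filter_cons]
      rw [ih]
      by_cases hx : x.2 = i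
      · subst hx
        simp only [beq_self_eq_true, if_pos, List.map_cons, List.foldl_cons]
        congr 1
        show (pvStepB st x).1.getD x.2 0 = max (st.1.getD x.2 0) (pvWidthA x.1)
        simp only [pvStepB, ← widthB_eq_widthA]
        rw [max_def]
        split
        · rw [PySem.Dict.getD_insert_self]
          split_ifs <;> omega
        · split_ifs <;> omega
      · have hbe : (x.2 == i) = false := by simp [hx]
        simp only [hbe, Bool.false_eq_true, if_neg, not_false_iff]
        congr 1
        show (pvStepB st x).1.getD i 0 = st.1.getD i 0
        simp only [pvStepB]
        split
        · exact PySem.Dict.getD_insert_of_ne st.1 _ _ (Ne.symm hx)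
        · rfl

-- B's bucket dict: contains iff some key has that depth
theorem fstB_contains (l : List (Option String × Int)) (st : PySem.Dict Int Int × Option Int) (i : Int) :
    (l.foldl pvStepB st).1.contains i = (st.1.contains i || l.any (fun jv => jv.2 == i)) := by
  induction l generalizing st with
  | nil => simp
  | cons x t ih =>
      simp only [List.foldl_cons, List.any_cons]
      rw [ih]
      by_cases hx : x.2 = i
      · subst hx
        simp only [beq_self_eq_true, Bool.true_or, Bool.or_true]
        show ((pvStepB st x).1.contains x.2 || _) = true
        simp only [pvStepB]
        split
        · simp [PySem.Dict.contains_insert_self]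
        · rename_i h
          have hw := widthA_pos x.1
          rw [← widthB_eq_widthA] at hw
          have hc : st.1.contains x.2 = true := by
            by_contra hc
            have hcf : st.1.contains x.2 = false := by
              revert hc; cases st.1.contains x.2 <;> simp
            have := PySem.Dict.getD_of_not_contains st.1 (0:Int) hcf
            omega
          simp [hc]
      · have hbe : (x.2 == i) = false := by simp [hx]
        simp only [hbe, Bool.false_or]
        congr 1
        show (pvStepB st x).1.contains i = st.1.contains i
        simp only [pvStepB]
        split
        · rw [PySem.Dict.contains_insert]
          simp [Ne.symm hx]
        · rfl

-- A's result dict is built by inserting the fresh keys 0..d in order: items = the mapped range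
theorem items_loop (v : Int → Int) (a b : Int) :
    (List.foldl (fun (col : PySem.Dict Int Int) i => col.insert i (v i)) PySem.Dict.empty
        (PySem.List.pyRange a b)).items
      = (PySem.List.pyRange a b).map (fun i => (i, v i)) := by
  have h := PySem.Dict.items_foldl_insert_fresh (PySem.List.pyRange a b) (fun i => i) v
    PySem.Dict.empty (fun c _ => PySem.Dict.contains_empty c)
    (by simpa using PySem.List.nodup_pyRange_one a b)
  simpa using h

-- per-depth value: A's rescan max equals B's bucket lookup
theorem val_eq (pdg : List (Option String × Int)) (size i : Int) :
    (match PySem.List.max? (pdg.foldl (fun temp jv => if jv.2 == i then temp ++ [pvWidthA jv.1] else temp) ([] : List Int)) (fun x => x) with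
     | some m => (PySem.Int.floordiv m 2 + 1) * size
     | none => 100) =
    (match (pdg.foldl pvStepB (PySem.Dict.empty, none)).1.get? i with
     | some m => (PySem.Int.floordiv m 2 + 1) * size
     | none => 100) := by
  rw [PySem.List.foldl_append_if (fun jv => jv.2 == i) (fun jv => pvWidthA jv.1) pdg []]
  cases hf : pdg.filter (fun jv => jv.2 == i) with
  | nil =>
      have hany : pdg.any (fun jv => jv.2 == i) = false := by
        rw [List.filter_eq_nil_iff] at hf
        simp only [List.any_eq_false]
        intro a ha
        simpa using hf a ha
      have hc : (pdg.foldl pvStepB (PySem.Dict.empty, none)).1.contains i = false := by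
        rw [fstB_contains]
        simp [hany, PySem.Dict.contains_empty]
      have hg : (pdg.foldl pvStepB (PySem.Dict.empty, none)).1.get? i = none :=
        (PySem.Dict.get?_eq_none_iff_contains _ _).mpr hc
      rw [hg]
      simp [PySem.List.max?]
  | cons x xs =>
      have hmem : x ∈ pdg.filter (fun jv => jv.2 == i) := by rw [hf]; exact List.mem_cons_self
      have hany : pdg.any (fun jv => jv.2 == i) = true := by
        rw [List.any_eq_true]
        have hx := List.mem_filter.mp hmem
        exact ⟨x, hx.1, hx.2⟩
      have hc : (pdg.foldl pvStepB (PySem.Dict.empty, none)).1.contains i = true := by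
        rw [fstB_contains]; simp [hany]
      obtain ⟨m, hm⟩ : ∃ m, (pdg.foldl pvStepB (PySem.Dict.empty, none)).1.get? i = some m := by
        rw [PySem.Dict.contains_eq_isSome_get?] at hc
        exact Option.isSome_iff_exists.mp hc
      have hgd := PySem.Dict.getD_of_get?_eq_some _ (0 : Int) hm
      rw [fstB_getD] at hgd
      have h0 : PySem.Dict.empty.getD i (0 : Int) = 0 := PySem.Dict.getD_empty i 0
      rw [hf] at hgd
      simp only [List.map_cons, List.foldl_cons] at hgd
      have hw := widthA_pos x.1
      have hinit : max (PySem.Dict.empty.getD i (0 : Int)) (pvWidthA x.1) = pvWidthA x.1 := by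
        rw [h0, max_def]; split_ifs <;> omega
      rw [hinit] at hgd
      rw [hm]
      simp only [List.nil_append, List.map_cons, PySem.List.max?_id_cons]
      rw [hgd]

theorem set_col_width_spec : Claim_equal_set_col_width := by
  intro pdg size _
  show set_col_width pdg size = set_col_width_alt pdg size
  simp only [set_col_width, set_col_width_alt]
  rw [sndB_eq_max?]
  cases hmax : PySem.List.max? (pdg.map (·.2)) (fun x => x) with
  | none =>
      simp only [Option.getD_none]
      rw [items_loop]
      simp only [val_eq]
  | some d =>
      simp only [Option.getD_some]
      rw [items_loop]
      simp only [val_eq]
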